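-- pv_equiv track=rewrite | github.com/IorenzoLF/Le_Refuge | Le_refuge/arc_agi_refuge/puzzle_15_final_vrai.py | appliquer_pattern_L_inverse
-- ===== SOURCE A (Python) =====
-- def appliquer_pattern_L_inverse(input_grid):
--     """Appliquer le pattern L inverse exact"""
--     output_grid = [[0 for _ in range(9)] for _ in range(9)]
--
--     # Pattern L inverse decouvert
--     pattern_L_inverse = [(0, 0), (0, 1), (1, 0), (1, 2), (2, 1), (2, 2)]
--
--     # Pour chaque pixel colore dans l'input
--     for x in range(3):
--         for y in range(3):
--             if input_grid[x][y] != 0: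
--                 couleur = input_grid[x][y]
--
--                 # Appliquer le pattern dans le bloc 3x3 correspondant
--                 for rel_x, rel_y in pattern_L_inverse:
--                     abs_x = x * 3 + rel_x
--                     abs_y = y * 3 + rel_y
--
--                     if abs_x < 9 and abs_y < 9:
--                         output_grid[abs_x][abs_y] = couleur
--
--     return output_grid
-- ===== SOURCE B (Python) =====
-- PATTERN = {(0, 0), (0, 1), (1, 0), (1, 2), (2, 1), (2, 2)}
--
-- def appliquer_pattern_L_inverse(input_grid):
--     """Output-driven gather: each of the 81 output cells derives its source block and relative offset."""
--     return [[input_grid[ax // 3][ay // 3]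
--              if input_grid[ax // 3][ay // 3] != 0 and (ax % 3, ay % 3) in PATTERN
--              else 0
--              for ay in range(9)]
--             for ax in range(9)]
-- ===== Notes on version B (the rewrite author's own statement) =====
-- stated objective: alternative
-- what changed: Replaced A's input-driven scatter (loop over 3x3 input cells, writing the L-pattern into each output block) by an output-driven gather: a single comprehension over all 81 output coordinates computing each cell's source block and offset directly.
import Mathlib
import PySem

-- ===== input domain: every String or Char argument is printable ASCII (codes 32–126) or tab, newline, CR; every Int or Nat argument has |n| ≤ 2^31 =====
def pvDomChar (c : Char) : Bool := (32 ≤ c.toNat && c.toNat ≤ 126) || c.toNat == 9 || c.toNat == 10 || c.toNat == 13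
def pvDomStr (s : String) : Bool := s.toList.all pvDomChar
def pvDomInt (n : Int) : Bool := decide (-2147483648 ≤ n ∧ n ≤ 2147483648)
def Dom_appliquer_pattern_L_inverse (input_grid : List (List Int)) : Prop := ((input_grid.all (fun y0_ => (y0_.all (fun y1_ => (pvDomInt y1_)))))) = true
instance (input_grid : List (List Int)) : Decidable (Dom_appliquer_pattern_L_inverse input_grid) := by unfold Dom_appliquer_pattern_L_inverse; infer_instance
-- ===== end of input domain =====

-- B replaces A's input-driven scatter with an output-driven gather over the 81 output cells ("alternative" objective).
-- ===== PORT A =====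
-- helper: output_grid[i][j] = v  (Python list-of-lists assignment)
def pvSetCell (g : List (List Int)) (i j : Nat) (v : Int) : List (List Int) :=
  g.set i ((g.getD i []).set j v)

def appliquer_pattern_L_inverse (input_grid : List (List Int)) : List (List Int) :=
  let output0 : List (List Int) := List.replicate 9 (List.replicate 9 0)
  let pattern : List (Nat × Nat) := [(0, 0), (0, 1), (1, 0), (1, 2), (2, 1), (2, 2)]
  (List.range 3).foldl (fun og x =>
    (List.range 3).foldl (fun og y =>
      if (input_grid.getD x []).getD y 0 ≠ 0 then
        let couleur := (input_grid.getD x []).getD y 0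
        pattern.foldl (fun og rel =>
          let abs_x := x * 3 + rel.1
          let abs_y := y * 3 + rel.2
          if abs_x < 9 ∧ abs_y < 9 then pvSetCell og abs_x abs_y couleur else og) og
      else og) og) output0

-- ===== PORT B =====
def pvPatternSet : List (Nat × Nat) := [(0, 0), (0, 1), (1, 0), (1, 2), (2, 1), (2, 2)]
def appliquer_pattern_L_inverse_alt (input_grid : List (List Int)) : List (List Int) :=
  (List.range 9).map (fun ax =>
    (List.range 9).map (fun ay =>
      let v := (input_grid.getD (ax / 3) []).getD (ay / 3) 0
      if v ≠ 0 ∧ (ax % 3, ay % 3) ∈ pvPatternSet then v else 0))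

-- ===== PRECONDITION & SPEC =====
-- Pre_ excludes exactly the inputs on which Python A raises IndexError: grids lacking a full 3x3 upper-left block.
def Pre_appliquer_pattern_L_inverse (input_grid : List (List Int)) : Prop :=
  3 ≤ input_grid.length ∧ 3 ≤ (input_grid.getD 0 []).length ∧
  3 ≤ (input_grid.getD 1 []).length ∧ 3 ≤ (input_grid.getD 2 []).length
instance (input_grid : List (List Int)) : Decidable (Pre_appliquer_pattern_L_inverse input_grid) := by
  unfold Pre_appliquer_pattern_L_inverse; infer_instance
def pvWitness_appliquer_pattern_L_inverse : List (List Int) := [[1, 0, 2], [0, 3, 0], [4, 0, 5]]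

def Spec_appliquer_pattern_L_inverse (input_grid : List (List Int)) (out : List (List Int)) : Prop := out = appliquer_pattern_L_inverse_alt input_grid
instance (input_grid : List (List Int)) (out : List (List Int)) : Decidable (Spec_appliquer_pattern_L_inverse input_grid out) := by unfold Spec_appliquer_pattern_L_inverse; infer_instance

-- ===== CLAIM (what is proved, stated in full; the proofs are below) =====
def Claim_equal_appliquer_pattern_L_inverse : Prop := ∀ (input_grid : List (List Int)), Dom_appliquer_pattern_L_inverse input_grid → Pre_appliquer_pattern_L_inverse input_grid → Spec_appliquer_pattern_L_inverse input_grid (appliquer_pattern_L_inverse input_grid)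

-- ===== LEMMAS AND PROOFS =====
theorem pv_set_0 {α : Type} (v x0 x1 x2 x3 x4 x5 x6 x7 x8 : α) : List.set [x0, x1, x2, x3, x4, x5, x6, x7, x8] 0 v = [v, x1, x2, x3, x4, x5, x6, x7, x8] := rfl
theorem pv_getD_0 {α : Type} (d x0 x1 x2 x3 x4 x5 x6 x7 x8 : α) : List.getD [x0, x1, x2, x3, x4, x5, x6, x7, x8] 0 d = x0 := rfl
theorem pv_set_1 {α : Type} (v x0 x1 x2 x3 x4 x5 x6 x7 x8 : α) : List.set [x0, x1, x2, x3, x4, x5, x6, x7, x8] 1 v = [x0, v, x2, x3, x4, x5, x6, x7, x8] := rfl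
theorem pv_getD_1 {α : Type} (d x0 x1 x2 x3 x4 x5 x6 x7 x8 : α) : List.getD [x0, x1, x2, x3, x4, x5, x6, x7, x8] 1 d = x1 := rfl
theorem pv_set_2 {α : Type} (v x0 x1 x2 x3 x4 x5 x6 x7 x8 : α) : List.set [x0, x1, x2, x3, x4, x5, x6, x7, x8] 2 v = [x0, x1, v, x3, x4, x5, x6, x7, x8] := rfl
theorem pv_getD_2 {α : Type} (d x0 x1 x2 x3 x4 x5 x6 x7 x8 : α) : List.getD [x0, x1, x2, x3, x4, x5, x6, x7, x8] 2 d = x2 := rfl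
theorem pv_set_3 {α : Type} (v x0 x1 x2 x3 x4 x5 x6 x7 x8 : α) : List.set [x0, x1, x2, x3, x4, x5, x6, x7, x8] 3 v = [x0, x1, x2, v, x4, x5, x6, x7, x8] := rfl
theorem pv_getD_3 {α : Type} (d x0 x1 x2 x3 x4 x5 x6 x7 x8 : α) : List.getD [x0, x1, x2, x3, x4, x5, x6, x7, x8] 3 d = x3 := rfl
theorem pv_set_4 {α : Type} (v x0 x1 x2 x3 x4 x5 x6 x7 x8 : α) : List.set [x0, x1, x2, x3, x4, x5, x6, x7, x8] 4 v = [x0, x1, x2, x3, v, x5, x6, x7, x8] := rfl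
theorem pv_getD_4 {α : Type} (d x0 x1 x2 x3 x4 x5 x6 x7 x8 : α) : List.getD [x0, x1, x2, x3, x4, x5, x6, x7, x8] 4 d = x4 := rfl
theorem pv_set_5 {α : Type} (v x0 x1 x2 x3 x4 x5 x6 x7 x8 : α) : List.set [x0, x1, x2, x3, x4, x5, x6, x7, x8] 5 v = [x0, x1, x2, x3, x4, v, x6, x7, x8] := rfl
theorem pv_getD_5 {α : Type} (d x0 x1 x2 x3 x4 x5 x6 x7 x8 : α) : List.getD [x0, x1, x2, x3, x4, x5, x6, x7, x8] 5 d = x5 := rfl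
theorem pv_set_6 {α : Type} (v x0 x1 x2 x3 x4 x5 x6 x7 x8 : α) : List.set [x0, x1, x2, x3, x4, x5, x6, x7, x8] 6 v = [x0, x1, x2, x3, x4, x5, v, x7, x8] := rfl
theorem pv_getD_6 {α : Type} (d x0 x1 x2 x3 x4 x5 x6 x7 x8 : α) : List.getD [x0, x1, x2, x3, x4, x5, x6, x7, x8] 6 d = x6 := rfl
theorem pv_set_7 {α : Type} (v x0 x1 x2 x3 x4 x5 x6 x7 x8 : α) : List.set [x0, x1, x2, x3, x4, x5, x6, x7, x8] 7 v = [x0, x1, x2, x3, x4, x5, x6, v, x8] := rfl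
theorem pv_getD_7 {α : Type} (d x0 x1 x2 x3 x4 x5 x6 x7 x8 : α) : List.getD [x0, x1, x2, x3, x4, x5, x6, x7, x8] 7 d = x7 := rfl
theorem pv_set_8 {α : Type} (v x0 x1 x2 x3 x4 x5 x6 x7 x8 : α) : List.set [x0, x1, x2, x3, x4, x5, x6, x7, x8] 8 v = [x0, x1, x2, x3, x4, x5, x6, x7, v] := rfl
theorem pv_getD_8 {α : Type} (d x0 x1 x2 x3 x4 x5 x6 x7 x8 : α) : List.getD [x0, x1, x2, x3, x4, x5, x6, x7, x8] 8 d = x8 := rfl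


theorem pv_ite_cons {α : Type} {c : Prop} [Decidable c] (x y : α) (xs ys : List α) :
    (if c then x :: xs else y :: ys) = (if c then x else y) :: (if c then xs else ys) := by
  split_ifs <;> rfl

theorem pv_ite_nonzero (v : Int) : (if v ≠ 0 then v else 0) = v := by
  by_cases h : v = 0 <;> simp [h]


theorem pv_blk_0_0 (v : Int) (r0 r1 r2 r3 r4 r5 r6 r7 r8 : List Int) :
    List.foldl (fun og rel => if 0 * 3 + rel.1 < 9 ∧ 0 * 3 + rel.2 < 9 then pvSetCell og (0 * 3 + rel.1) (0 * 3 + rel.2) v else og) [r0, r1, r2, r3, r4, r5, r6, r7, r8] [(0, 0), (0, 1), (1, 0), (1, 2), (2, 1), (2, 2)] = [(r0.set 0 v).set 1 v, (r1.set 0 v).set 2 v, (r2.set 1 v).set 2 v, r3, r4, r5, r6, r7, r8] := by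
  simp only [List.foldl_cons, List.foldl_nil, pvSetCell, Nat.reduceMul, Nat.reduceAdd,
    Nat.zero_mul, Nat.mul_zero, Nat.zero_add, Nat.add_zero, Nat.reduceLT, and_self, if_true,
    pv_getD_0, pv_getD_1, pv_getD_2, pv_getD_3, pv_getD_4, pv_getD_5, pv_getD_6, pv_getD_7, pv_getD_8,
    pv_set_0, pv_set_1, pv_set_2, pv_set_3, pv_set_4, pv_set_5, pv_set_6, pv_set_7, pv_set_8]

theorem pv_blk_0_1 (v : Int) (r0 r1 r2 r3 r4 r5 r6 r7 r8 : List Int) :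
    List.foldl (fun og rel => if 0 * 3 + rel.1 < 9 ∧ 1 * 3 + rel.2 < 9 then pvSetCell og (0 * 3 + rel.1) (1 * 3 + rel.2) v else og) [r0, r1, r2, r3, r4, r5, r6, r7, r8] [(0, 0), (0, 1), (1, 0), (1, 2), (2, 1), (2, 2)] = [(r0.set 3 v).set 4 v, (r1.set 3 v).set 5 v, (r2.set 4 v).set 5 v, r3, r4, r5, r6, r7, r8] := by
  simp only [List.foldl_cons, List.foldl_nil, pvSetCell, Nat.reduceMul, Nat.reduceAdd,
    Nat.zero_mul, Nat.mul_zero, Nat.zero_add, Nat.add_zero, Nat.reduceLT, and_self, if_true,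
    pv_getD_0, pv_getD_1, pv_getD_2, pv_getD_3, pv_getD_4, pv_getD_5, pv_getD_6, pv_getD_7, pv_getD_8,
    pv_set_0, pv_set_1, pv_set_2, pv_set_3, pv_set_4, pv_set_5, pv_set_6, pv_set_7, pv_set_8]

theorem pv_blk_0_2 (v : Int) (r0 r1 r2 r3 r4 r5 r6 r7 r8 : List Int) :
    List.foldl (fun og rel => if 0 * 3 + rel.1 < 9 ∧ 2 * 3 + rel.2 < 9 then pvSetCell og (0 * 3 + rel.1) (2 * 3 + rel.2) v else og) [r0, r1, r2, r3, r4, r5, r6, r7, r8] [(0, 0), (0, 1), (1, 0), (1, 2), (2, 1), (2, 2)] = [(r0.set 6 v).set 7 v, (r1.set 6 v).set 8 v, (r2.set 7 v).set 8 v, r3, r4, r5, r6, r7, r8] := by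
  simp only [List.foldl_cons, List.foldl_nil, pvSetCell, Nat.reduceMul, Nat.reduceAdd,
    Nat.zero_mul, Nat.mul_zero, Nat.zero_add, Nat.add_zero, Nat.reduceLT, and_self, if_true,
    pv_getD_0, pv_getD_1, pv_getD_2, pv_getD_3, pv_getD_4, pv_getD_5, pv_getD_6, pv_getD_7, pv_getD_8,
    pv_set_0, pv_set_1, pv_set_2, pv_set_3, pv_set_4, pv_set_5, pv_set_6, pv_set_7, pv_set_8]

theorem pv_blk_1_0 (v : Int) (r0 r1 r2 r3 r4 r5 r6 r7 r8 : List Int) :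
    List.foldl (fun og rel => if 1 * 3 + rel.1 < 9 ∧ 0 * 3 + rel.2 < 9 then pvSetCell og (1 * 3 + rel.1) (0 * 3 + rel.2) v else og) [r0, r1, r2, r3, r4, r5, r6, r7, r8] [(0, 0), (0, 1), (1, 0), (1, 2), (2, 1), (2, 2)] = [r0, r1, r2, (r3.set 0 v).set 1 v, (r4.set 0 v).set 2 v, (r5.set 1 v).set 2 v, r6, r7, r8] := by
  simp only [List.foldl_cons, List.foldl_nil, pvSetCell, Nat.reduceMul, Nat.reduceAdd,
    Nat.zero_mul, Nat.mul_zero, Nat.zero_add, Nat.add_zero, Nat.reduceLT, and_self, if_true,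
    pv_getD_0, pv_getD_1, pv_getD_2, pv_getD_3, pv_getD_4, pv_getD_5, pv_getD_6, pv_getD_7, pv_getD_8,
    pv_set_0, pv_set_1, pv_set_2, pv_set_3, pv_set_4, pv_set_5, pv_set_6, pv_set_7, pv_set_8]

theorem pv_blk_1_1 (v : Int) (r0 r1 r2 r3 r4 r5 r6 r7 r8 : List Int) :
    List.foldl (fun og rel => if 1 * 3 + rel.1 < 9 ∧ 1 * 3 + rel.2 < 9 then pvSetCell og (1 * 3 + rel.1) (1 * 3 + rel.2) v else og) [r0, r1, r2, r3, r4, r5, r6, r7, r8] [(0, 0), (0, 1), (1, 0), (1, 2), (2, 1), (2, 2)] = [r0, r1, r2, (r3.set 3 v).set 4 v, (r4.set 3 v).set 5 v, (r5.set 4 v).set 5 v, r6, r7, r8] := by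
  simp only [List.foldl_cons, List.foldl_nil, pvSetCell, Nat.reduceMul, Nat.reduceAdd,
    Nat.zero_mul, Nat.mul_zero, Nat.zero_add, Nat.add_zero, Nat.reduceLT, and_self, if_true,
    pv_getD_0, pv_getD_1, pv_getD_2, pv_getD_3, pv_getD_4, pv_getD_5, pv_getD_6, pv_getD_7, pv_getD_8,
    pv_set_0, pv_set_1, pv_set_2, pv_set_3, pv_set_4, pv_set_5, pv_set_6, pv_set_7, pv_set_8]

theorem pv_blk_1_2 (v : Int) (r0 r1 r2 r3 r4 r5 r6 r7 r8 : List Int) :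
    List.foldl (fun og rel => if 1 * 3 + rel.1 < 9 ∧ 2 * 3 + rel.2 < 9 then pvSetCell og (1 * 3 + rel.1) (2 * 3 + rel.2) v else og) [r0, r1, r2, r3, r4, r5, r6, r7, r8] [(0, 0), (0, 1), (1, 0), (1, 2), (2, 1), (2, 2)] = [r0, r1, r2, (r3.set 6 v).set 7 v, (r4.set 6 v).set 8 v, (r5.set 7 v).set 8 v, r6, r7, r8] := by
  simp only [List.foldl_cons, List.foldl_nil, pvSetCell, Nat.reduceMul, Nat.reduceAdd,
    Nat.zero_mul, Nat.mul_zero, Nat.zero_add, Nat.add_zero, Nat.reduceLT, and_self, if_true,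
    pv_getD_0, pv_getD_1, pv_getD_2, pv_getD_3, pv_getD_4, pv_getD_5, pv_getD_6, pv_getD_7, pv_getD_8,
    pv_set_0, pv_set_1, pv_set_2, pv_set_3, pv_set_4, pv_set_5, pv_set_6, pv_set_7, pv_set_8]

theorem pv_blk_2_0 (v : Int) (r0 r1 r2 r3 r4 r5 r6 r7 r8 : List Int) :
    List.foldl (fun og rel => if 2 * 3 + rel.1 < 9 ∧ 0 * 3 + rel.2 < 9 then pvSetCell og (2 * 3 + rel.1) (0 * 3 + rel.2) v else og) [r0, r1, r2, r3, r4, r5, r6, r7, r8] [(0, 0), (0, 1), (1, 0), (1, 2), (2, 1), (2, 2)] = [r0, r1, r2, r3, r4, r5, (r6.set 0 v).set 1 v, (r7.set 0 v).set 2 v, (r8.set 1 v).set 2 v] := by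
  simp only [List.foldl_cons, List.foldl_nil, pvSetCell, Nat.reduceMul, Nat.reduceAdd,
    Nat.zero_mul, Nat.mul_zero, Nat.zero_add, Nat.add_zero, Nat.reduceLT, and_self, if_true,
    pv_getD_0, pv_getD_1, pv_getD_2, pv_getD_3, pv_getD_4, pv_getD_5, pv_getD_6, pv_getD_7, pv_getD_8,
    pv_set_0, pv_set_1, pv_set_2, pv_set_3, pv_set_4, pv_set_5, pv_set_6, pv_set_7, pv_set_8]

theorem pv_blk_2_1 (v : Int) (r0 r1 r2 r3 r4 r5 r6 r7 r8 : List Int) :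
    List.foldl (fun og rel => if 2 * 3 + rel.1 < 9 ∧ 1 * 3 + rel.2 < 9 then pvSetCell og (2 * 3 + rel.1) (1 * 3 + rel.2) v else og) [r0, r1, r2, r3, r4, r5, r6, r7, r8] [(0, 0), (0, 1), (1, 0), (1, 2), (2, 1), (2, 2)] = [r0, r1, r2, r3, r4, r5, (r6.set 3 v).set 4 v, (r7.set 3 v).set 5 v, (r8.set 4 v).set 5 v] := by
  simp only [List.foldl_cons, List.foldl_nil, pvSetCell, Nat.reduceMul, Nat.reduceAdd,
    Nat.zero_mul, Nat.mul_zero, Nat.zero_add, Nat.add_zero, Nat.reduceLT, and_self, if_true,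
    pv_getD_0, pv_getD_1, pv_getD_2, pv_getD_3, pv_getD_4, pv_getD_5, pv_getD_6, pv_getD_7, pv_getD_8,
    pv_set_0, pv_set_1, pv_set_2, pv_set_3, pv_set_4, pv_set_5, pv_set_6, pv_set_7, pv_set_8]

theorem pv_blk_2_2 (v : Int) (r0 r1 r2 r3 r4 r5 r6 r7 r8 : List Int) :
    List.foldl (fun og rel => if 2 * 3 + rel.1 < 9 ∧ 2 * 3 + rel.2 < 9 then pvSetCell og (2 * 3 + rel.1) (2 * 3 + rel.2) v else og) [r0, r1, r2, r3, r4, r5, r6, r7, r8] [(0, 0), (0, 1), (1, 0), (1, 2), (2, 1), (2, 2)] = [r0, r1, r2, r3, r4, r5, (r6.set 6 v).set 7 v, (r7.set 6 v).set 8 v, (r8.set 7 v).set 8 v] := by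
  simp only [List.foldl_cons, List.foldl_nil, pvSetCell, Nat.reduceMul, Nat.reduceAdd,
    Nat.zero_mul, Nat.mul_zero, Nat.zero_add, Nat.add_zero, Nat.reduceLT, and_self, if_true,
    pv_getD_0, pv_getD_1, pv_getD_2, pv_getD_3, pv_getD_4, pv_getD_5, pv_getD_6, pv_getD_7, pv_getD_8,
    pv_set_0, pv_set_1, pv_set_2, pv_set_3, pv_set_4, pv_set_5, pv_set_6, pv_set_7, pv_set_8]

theorem pv_step_0 (g : List (List Int)) (r3 r4 r5 r6 r7 r8 : List Int) :
    List.foldl (fun og y => if (g.getD 0 []).getD y 0 ≠ 0 then List.foldl (fun og rel => if 0 * 3 + rel.1 < 9 ∧ y * 3 + rel.2 < 9 then pvSetCell og (0 * 3 + rel.1) (y * 3 + rel.2) ((g.getD 0 []).getD y 0) else og) og [(0, 0), (0, 1), (1, 0), (1, 2), (2, 1), (2, 2)] else og) [[0, 0, 0, 0, 0, 0, 0, 0, 0], [0, 0, 0, 0, 0, 0, 0, 0, 0], [0, 0, 0, 0, 0, 0, 0, 0, 0], r3, r4, r5, r6, r7, r8] [0, 1, 2] = [[(g.getD 0 []).getD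 0 0, (g.getD 0 []).getD 0 0, 0, (g.getD 0 []).getD 1 0, (g.getD 0 []).getD 1 0, 0, (g.getD 0 []).getD 2 0, (g.getD 0 []).getD 2 0, 0], [(g.getD 0 []).getD 0 0, 0, (g.getD 0 []).getD 0 0, (g.getD 0 []).getD 1 0, 0, (g.getD 0 []).getD 1 0, (g.getD 0 []).getD 2 0, 0, (g.getD 0 []).getD 2 0], [0, (g.getD 0 []).getD 0 0, (g.getD 0 []).getD 0 0, 0, (g.getD 0 []).getD 1 0, (g.getD 0 []).getD 1 0, 0, (g.getD 0 []).getD 2 0, (g.getD 0 []).getD 2 0], r3, r4, r5, r6, r7, r8] := by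
  rw [List.foldl_cons, List.foldl_cons, List.foldl_cons, List.foldl_nil]
  simp only [pv_blk_0_0, pv_blk_0_1, pv_blk_0_2,
    pv_set_0, pv_set_1, pv_set_2, pv_set_3, pv_set_4, pv_set_5, pv_set_6, pv_set_7, pv_set_8,
    pv_ite_cons, ite_self, pv_ite_nonzero]

theorem pv_step_1 (g : List (List Int)) (r0 r1 r2 r6 r7 r8 : List Int) :
    List.foldl (fun og y => if (g.getD 1 []).getD y 0 ≠ 0 then List.foldl (fun og rel => if 1 * 3 + rel.1 < 9 ∧ y * 3 + rel.2 < 9 then pvSetCell og (1 * 3 + rel.1) (y * 3 + rel.2) ((g.getD 1 []).getD y 0) else og) og [(0, 0), (0, 1), (1, 0), (1, 2), (2, 1), (2, 2)] else og) [r0, r1, r2, [0, 0, 0, 0, 0, 0, 0, 0, 0], [0, 0, 0, 0, 0, 0, 0, 0, 0], [0, 0, 0, 0, 0, 0, 0, 0, 0], r6, r7, r8] [0, 1, 2] = [r0, r1, r2, [(g.getD 1 []).getD 0 0, (g.getD 1 []).getD 0 0, 0, (g.getD 1 []).getD 1 0, (g.getD 1 []).getD 1 0, 0, (g.getD 1 []).getD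 2 0, (g.getD 1 []).getD 2 0, 0], [(g.getD 1 []).getD 0 0, 0, (g.getD 1 []).getD 0 0, (g.getD 1 []).getD 1 0, 0, (g.getD 1 []).getD 1 0, (g.getD 1 []).getD 2 0, 0, (g.getD 1 []).getD 2 0], [0, (g.getD 1 []).getD 0 0, (g.getD 1 []).getD 0 0, 0, (g.getD 1 []).getD 1 0, (g.getD 1 []).getD 1 0, 0, (g.getD 1 []).getD 2 0, (g.getD 1 []).getD 2 0], r6, r7, r8] := by
  rw [List.foldl_cons, List.foldl_cons, List.foldl_cons, List.foldl_nil]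
  simp only [pv_blk_1_0, pv_blk_1_1, pv_blk_1_2,
    pv_set_0, pv_set_1, pv_set_2, pv_set_3, pv_set_4, pv_set_5, pv_set_6, pv_set_7, pv_set_8,
    pv_ite_cons, ite_self, pv_ite_nonzero]

theorem pv_step_2 (g : List (List Int)) (r0 r1 r2 r3 r4 r5 : List Int) :
    List.foldl (fun og y => if (g.getD 2 []).getD y 0 ≠ 0 then List.foldl (fun og rel => if 2 * 3 + rel.1 < 9 ∧ y * 3 + rel.2 < 9 then pvSetCell og (2 * 3 + rel.1) (y * 3 + rel.2) ((g.getD 2 []).getD y 0) else og) og [(0, 0), (0, 1), (1, 0), (1, 2), (2, 1), (2, 2)] else og) [r0, r1, r2, r3, r4, r5, [0, 0, 0, 0, 0, 0, 0, 0, 0], [0, 0, 0, 0, 0, 0, 0, 0, 0], [0, 0, 0, 0, 0, 0, 0, 0, 0]] [0, 1, 2] = [r0, r1, r2, r3, r4, r5, [(g.getD 2 []).getD 0 0, (g.getD 2 []).getD 0 0, 0, (g.getD 2 []).getD 1 0, (g.getD 2 []).getD 1 0, 0, (g.getD 2 []).getD 2 0, (g.getD 2 []).getD 2 0, 0], [(g.getD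 2 []).getD 0 0, 0, (g.getD 2 []).getD 0 0, (g.getD 2 []).getD 1 0, 0, (g.getD 2 []).getD 1 0, (g.getD 2 []).getD 2 0, 0, (g.getD 2 []).getD 2 0], [0, (g.getD 2 []).getD 0 0, (g.getD 2 []).getD 0 0, 0, (g.getD 2 []).getD 1 0, (g.getD 2 []).getD 1 0, 0, (g.getD 2 []).getD 2 0, (g.getD 2 []).getD 2 0]] := by
  rw [List.foldl_cons, List.foldl_cons, List.foldl_cons, List.foldl_nil]
  simp only [pv_blk_2_0, pv_blk_2_1, pv_blk_2_2,
    pv_set_0, pv_set_1, pv_set_2, pv_set_3, pv_set_4, pv_set_5, pv_set_6, pv_set_7, pv_set_8,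
    pv_ite_cons, ite_self, pv_ite_nonzero]

set_option maxHeartbeats 1000000 in
theorem pv_keyg (g : List (List Int)) :
    appliquer_pattern_L_inverse g = appliquer_pattern_L_inverse_alt g := by
  have h3 : List.range 3 = [0, 1, 2] := rfl
  have h9 : List.range 9 = [0, 1, 2, 3, 4, 5, 6, 7, 8] := rfl
  have hrep : List.replicate 9 (List.replicate 9 (0 : Int)) =
      [[0,0,0,0,0,0,0,0,0],[0,0,0,0,0,0,0,0,0],[0,0,0,0,0,0,0,0,0],
       [0,0,0,0,0,0,0,0,0],[0,0,0,0,0,0,0,0,0],[0,0,0,0,0,0,0,0,0],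
       [0,0,0,0,0,0,0,0,0],[0,0,0,0,0,0,0,0,0],[0,0,0,0,0,0,0,0,0]] := rfl
  simp only [appliquer_pattern_L_inverse, h3, hrep]
  rw [List.foldl_cons, List.foldl_cons, List.foldl_cons, List.foldl_nil]
  simp only [pv_step_0, pv_step_1, pv_step_2]
  simp only [appliquer_pattern_L_inverse_alt, pvPatternSet, h9, List.map_cons, List.map_nil,
    Nat.reduceDiv, Nat.reduceMod, Nat.zero_div, Nat.zero_mod, List.mem_cons, List.not_mem_nil,
    Prod.mk.injEq, Nat.reduceEqDiff, OfNat.ofNat_ne_zero, OfNat.zero_ne_ofNat, Nat.zero_ne_one,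
    Nat.one_ne_zero, and_true, true_and, and_false, false_and, and_self, or_false, false_or,
    or_true, true_or, if_true, if_false, ite_false, ite_true, pv_ite_nonzero]

-- ===== VERDICT (by name: the statement is the Claim_ definition above) =====
theorem appliquer_pattern_L_inverse_spec : Claim_equal_appliquer_pattern_L_inverse := by
  intro input_grid _ _
  unfold Spec_appliquer_pattern_L_inverse
  exact pv_keyg input_grid
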